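-- pv_equiv track=rewrite | github.com/yangzongwu/leetcode | leetcode2/0413. Arithmetic Slices.py | cal_num
-- ===== SOURCE A (Python) =====
-- def cal_num(n):
--     if n<3:return 0
--     if n==3:return 1
--
--     rep=0
--     i=3
--     while n>=i:
--         rep+=n-i+1
--         i+=1
--     return rep
-- ===== SOURCE B (Python) =====
-- def cal_num(n):
--     if n < 3:
--         return 0
--     return (n - 2) * (n - 1) // 2
-- ===== Notes on version B (the rewrite author's own statement) =====
-- stated objective: faster
-- what changed: Replaced the while loop summing n-i+1 for i=3..n with the closed form (n-2)(n-1)//2.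
import Mathlib
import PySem

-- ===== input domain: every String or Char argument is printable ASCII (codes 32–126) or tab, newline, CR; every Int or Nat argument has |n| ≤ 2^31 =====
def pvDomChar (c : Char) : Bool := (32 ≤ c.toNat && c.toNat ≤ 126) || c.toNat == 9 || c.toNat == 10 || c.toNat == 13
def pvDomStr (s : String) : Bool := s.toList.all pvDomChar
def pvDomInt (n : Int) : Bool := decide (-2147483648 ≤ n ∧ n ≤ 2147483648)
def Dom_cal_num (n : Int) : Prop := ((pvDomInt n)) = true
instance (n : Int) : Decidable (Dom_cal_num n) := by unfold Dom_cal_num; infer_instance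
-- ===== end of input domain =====

-- B replaces A's O(n) summation loop with the closed form (n-2)(n-1)//2 (faster, asymptotic).
-- ===== PORT A =====
-- literal port of A's while loop: state (i, rep), runs while n ≥ i
def calNumLoop (n i rep : Int) : Int :=
  if h : n ≥ i then calNumLoop n (i + 1) (rep + (n - i + 1)) else rep
termination_by (n + 1 - i).toNat
decreasing_by omega

def cal_num (n : Int) : Int :=
  if n < 3 then 0
  else if n = 3 then 1
  else calNumLoop n 3 0

-- ===== PORT B =====
def cal_num_alt (n : Int) : Int :=
  if n < 3 then 0
  else PySem.Int.floordiv ((n - 2) * (n - 1)) 2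

-- ===== PRECONDITION & SPEC =====
def Spec_cal_num (n : Int) (out : Int) : Prop := out = cal_num_alt n
instance (n : Int) (out : Int) : Decidable (Spec_cal_num n out) := by unfold Spec_cal_num; infer_instance

-- ===== CLAIM (what is proved, stated in full; the proofs are below) =====
def Claim_equal_cal_num : Prop := ∀ (n : Int), Dom_cal_num n → Spec_cal_num n (cal_num n)

-- ===== LEMMAS AND PROOFS =====

-- ===== VERDICT (by name: the statement is the Claim_ definition above) =====
-- loop invariant: calNumLoop n i rep = rep + T(n-i+1) where T(k)=k(k+1)/2, for i ≤ n+1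
theorem calNumLoop_eq (n i rep : Int) (h : i ≤ n + 1) :
    calNumLoop n i rep = rep + (n - i + 1) * (n - i + 2) / 2 := by
  rw [calNumLoop]
  split_ifs with hge
  · have := calNumLoop_eq n (i + 1) (rep + (n - i + 1)) (by omega)
    rw [this]
    have h2 : (0:Int) < 2 := by omega
    have hk : (n - i + 1) * (n - i + 2) = (n - (i+1) + 1) * (n - (i+1) + 2) + 2 * (n - i + 1) := by ring
    rw [hk, Int.add_mul_ediv_left _ _ (by omega : (2:Int) ≠ 0)]
    ring
  · have : i = n + 1 := by omega
    subst this
    norm_num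
termination_by (n + 1 - i).toNat
decreasing_by omega

theorem cal_num_spec : Claim_equal_cal_num := by
  intro n _
  unfold Spec_cal_num cal_num cal_num_alt
  split_ifs with h1 h2
  · rfl
  · subst h2; decide
  · rw [calNumLoop_eq n 3 0 (by omega)]
    rw [PySem.Int.floordiv_eq_ediv_of_pos (by omega)]
    have : (n - 3 + 1) * (n - 3 + 2) = (n - 2) * (n - 1) := by ring
    rw [this]
    ring
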